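-- pv_equiv track=rewrite | github.com/tutuatututua/yunews | backend/app/services/videos_service.py | summary_key_points
-- ===== SOURCE A (Python) =====
-- from typing import Any
--
-- def summary_key_points(summary_obj: Any, max_points: int = 10) -> list[str]:
--     if not isinstance(summary_obj, dict):
--         return []
--
--     candidates: list[str] = []
--
--     def _extend(items) -> None:
--         if not isinstance(items, list):
--             return
--         for x in items:
--             s = str(x or "").strip()
--             if s:
--                 candidates.append(s)
--
--     if any(k in summary_obj for k in ("positive", "negative", "neutral")):
--         _extend(summary_obj.get("positive") or [])
--         _extend(summary_obj.get("negative") or [])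
--         _extend(summary_obj.get("neutral") or [])
--     else:
--         _extend(summary_obj.get("bull_case") or [])
--         _extend(summary_obj.get("bear_case") or [])
--         _extend(summary_obj.get("risks") or [])
--
--     seen: set[str] = set()
--     out: list[str] = []
--     for s in candidates:
--         if s in seen:
--             continue
--         seen.add(s)
--         out.append(s)
--         if len(out) >= max_points:
--             break
--     return out
-- ===== SOURCE B (Python) =====
-- def summary_key_points(summary_obj, max_points=10):
--     if not isinstance(summary_obj, dict):
--         return []
--     if any(k in summary_obj for k in ("positive", "negative", "neutral")):
--         keys = ("positive", "negative", "neutral")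
--     else:
--         keys = ("bull_case", "bear_case", "risks")
--     seen = set()
--     out = []
--     for k in keys:
--         items = summary_obj.get(k) or []
--         if not isinstance(items, list):
--             continue
--         for x in items:
--             s = str(x or "").strip()
--             if s and s not in seen:
--                 seen.add(s)
--                 out.append(s)
--                 if len(out) >= max_points:
--                     return out
--     return out
-- ===== Notes on version B (the rewrite author's own statement) =====
-- stated objective: simpler
-- what changed: Fuses A's two passes (collect all candidates, then dedup with early exit) into one loop over the chosen keys that strips, dedups via a seen-set and stops as soon as max_points items are emitted, dropping the candidates list and the _extend helper.
import Mathlib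
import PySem

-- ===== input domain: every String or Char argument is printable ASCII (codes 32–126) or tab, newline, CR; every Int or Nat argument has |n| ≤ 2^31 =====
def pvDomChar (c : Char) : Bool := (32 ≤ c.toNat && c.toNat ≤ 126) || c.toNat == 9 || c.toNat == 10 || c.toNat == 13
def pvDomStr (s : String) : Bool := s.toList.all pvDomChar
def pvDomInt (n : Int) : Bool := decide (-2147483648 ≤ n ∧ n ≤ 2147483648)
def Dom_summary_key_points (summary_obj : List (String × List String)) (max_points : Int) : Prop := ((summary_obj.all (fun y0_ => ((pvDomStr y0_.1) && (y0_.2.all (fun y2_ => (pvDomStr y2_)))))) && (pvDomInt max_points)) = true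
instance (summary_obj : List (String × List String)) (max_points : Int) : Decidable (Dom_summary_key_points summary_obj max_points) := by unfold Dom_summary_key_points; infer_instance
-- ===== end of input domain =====

-- B fuses A's two passes (collect all candidates, then dedup with break) into one
-- loop over the chosen keys maintaining seen/out inline with an early return (objective: simpler).

-- ===== PORT A =====
-- summary_obj.get(k): first match in the association list
def aGet (d : List (String × List String)) (k : String) : Option (List String) :=
  (d.find? (fun p => p.1 == k)).map (·.2)

-- summary_obj.get(k) or []
def aGetOr (d : List (String × List String)) (k : String) : List String :=
  match aGet d k with
  | some v => if v.isEmpty then [] else v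
  | none => []

-- _extend: for x in items: s = str(x or "").strip(); if s: candidates.append(s)
-- (isinstance(items, list) is always true under the typed signature)
def aExtend (cands : List String) (items : List String) : List String :=
  items.foldl (fun acc x =>
    let s := PySem.Str.strip (if x == "" then "" else x)
    if s ≠ "" then acc ++ [s] else acc) cands

-- the dedup loop with 'break' once len(out) >= max_points
def aDedup (mp : Int) : List String → PySem.Set String → List String → List String
  | [], _, out => out
  | s :: rest, seen, out =>
    if PySem.Set.contains seen s then aDedup mp rest seen out
    else
      let seen' := PySem.Set.add seen s
      let out' := out ++ [s]
      if mp ≤ (out'.length : Int) then out' else aDedup mp rest seen' out'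

def summary_key_points (summary_obj : List (String × List String)) (max_points : Int) : List String :=
  let candidates :=
    if ["positive", "negative", "neutral"].any (fun k => (aGet summary_obj k).isSome) then
      aExtend (aExtend (aExtend [] (aGetOr summary_obj "positive")) (aGetOr summary_obj "negative")) (aGetOr summary_obj "neutral")
    else
      aExtend (aExtend (aExtend [] (aGetOr summary_obj "bull_case")) (aGetOr summary_obj "bear_case")) (aGetOr summary_obj "risks")
  aDedup max_points candidates PySem.Set.empty []

-- ===== PORT B =====
-- summary_obj.get(k) or []  (first match; missing or empty value -> [])
def bItems (d : List (String × List String)) (k : String) : List String :=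
  match (d.find? (fun p => p.1 == k)).map (·.2) with
  | some v => if v.isEmpty then [] else v
  | none => []

-- inner loop over one key's items; Bool = 'returned early (out is full)'
def bInner (mp : Int) : List String → PySem.Set String → List String →
    PySem.Set String × List String × Bool
  | [], seen, out => (seen, out, false)
  | x :: rest, seen, out =>
    let s := PySem.Str.strip (if x == "" then "" else x)
    if s ≠ "" ∧ ¬ PySem.Set.contains seen s then
      let seen' := PySem.Set.add seen s
      let out' := out ++ [s]
      if mp ≤ (out'.length : Int) then (seen', out', true)
      else bInner mp rest seen' out'
    else bInner mp rest seen out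

-- outer loop over the chosen keys
def bOuter (d : List (String × List String)) (mp : Int) :
    List String → PySem.Set String → List String → List String
  | [], _, out => out
  | k :: ks, seen, out =>
    match bInner mp (bItems d k) seen out with
    | (_, out', true) => out'
    | (seen', out', false) => bOuter d mp ks seen' out'

def summary_key_points_alt (summary_obj : List (String × List String)) (max_points : Int) : List String :=
  let keys :=
    if ["positive", "negative", "neutral"].any (fun k => (summary_obj.find? (fun p => p.1 == k)).isSome) then
      ["positive", "negative", "neutral"]
    else
      ["bull_case", "bear_case", "risks"]
  bOuter summary_obj max_points keys PySem.Set.empty []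

-- ===== PRECONDITION & SPEC =====
def Spec_summary_key_points (summary_obj : List (String × List String)) (max_points : Int) (out : List String) : Prop := out = summary_key_points_alt summary_obj max_points
instance (summary_obj : List (String × List String)) (max_points : Int) (out : List String) : Decidable (Spec_summary_key_points summary_obj max_points out) := by unfold Spec_summary_key_points; infer_instance

-- ===== CLAIM (what is proved, stated in full; the proofs are below) =====
def Claim_equal_summary_key_points : Prop := ∀ (summary_obj : List (String × List String)) (max_points : Int), Dom_summary_key_points summary_obj max_points → Spec_summary_key_points summary_obj max_points (summary_key_points summary_obj max_points)

-- ===== LEMMAS AND PROOFS =====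

-- the stripped, non-empty candidates produced by one items list
def stripF (x : String) : String := PySem.Str.strip (if x == "" then "" else x)
def candsOf (items : List String) : List String := (items.map stripF).filter (· ≠ "")

-- aDedup with an explicit 'stopped' flag, for composing across appends
def dAux (mp : Int) : List String → PySem.Set String → List String →
    PySem.Set String × List String × Bool
  | [], seen, out => (seen, out, false)
  | s :: rest, seen, out =>
    if PySem.Set.contains seen s then dAux mp rest seen out
    else
      let seen' := PySem.Set.add seen s
      let out' := out ++ [s]
      if mp ≤ (out'.length : Int) then (seen', out', true)
      else dAux mp rest seen' out'

theorem aExtend_eq (items : List String) : ∀ cands, aExtend cands items = cands ++ candsOf items := by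
  induction items with
  | nil => intro cands; simp [aExtend, candsOf]
  | cons x rest ih =>
    intro cands
    simp only [aExtend, List.foldl_cons] at *
    by_cases h : stripF x = ""
    · simp [candsOf, stripF] at *
      simp [h, ih]
    · simp [candsOf, stripF] at *
      simp [h, ih]

theorem aDedup_eq (mp : Int) (l : List String) : ∀ seen out,
    aDedup mp l seen out = (dAux mp l seen out).2.1 := by
  induction l with
  | nil => intro seen out; simp [aDedup, dAux]
  | cons s rest ih =>
    intro seen out
    simp only [aDedup, dAux]
    split_ifs with h h2
    · exact ih _ _
    · rfl
    · exact ih _ _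

theorem dAux_append (mp : Int) (l1 l2 : List String) : ∀ seen out,
    dAux mp (l1 ++ l2) seen out =
      match dAux mp l1 seen out with
      | (s', o', true) => (s', o', true)
      | (s', o', false) => dAux mp l2 s' o' := by
  induction l1 with
  | nil => intro seen out; simp [dAux]
  | cons s rest ih =>
    intro seen out
    simp only [List.cons_append, dAux]
    split_ifs with h h2
    · exact ih _ _
    · rfl
    · exact ih _ _

theorem bInner_eq (mp : Int) (items : List String) : ∀ seen out,
    bInner mp items seen out = dAux mp (candsOf items) seen out := by
  induction items with
  | nil => intro seen out; simp [bInner, candsOf, dAux]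
  | cons x rest ih =>
    intro seen out
    simp only [bInner]
    by_cases h : stripF x = ""
    · have : candsOf (x :: rest) = candsOf rest := by simp [candsOf, h]
      rw [this]
      simp [stripF] at h
      simp [h, ih]
    · have hc : candsOf (x :: rest) = stripF x :: candsOf rest := by simp [candsOf, h]
      rw [hc]
      simp only [dAux]
      by_cases hs : PySem.Set.contains seen (stripF x)
      · simp [stripF] at hs h ⊢
        simp [hs, h, ih]
      · simp [stripF] at hs h ⊢
        simp only [hs, h, not_false_iff, and_true, if_true, if_false]
        by_cases h2 : mp ≤ ((out ++ [PySem.Str.strip x]).length : Int) <;> simp [ih]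

theorem bItems_eq (d : List (String × List String)) (k : String) : bItems d k = aGetOr d k := by
  simp [bItems, aGetOr, aGet]

theorem main_eq (d : List (String × List String)) (mp : Int) (k1 k2 k3 : String) :
    aDedup mp (aExtend (aExtend (aExtend [] (aGetOr d k1)) (aGetOr d k2)) (aGetOr d k3))
      PySem.Set.empty []
    = bOuter d mp [k1, k2, k3] PySem.Set.empty [] := by
  simp only [aExtend_eq, List.nil_append, aDedup_eq, dAux_append]
  simp only [bOuter, bInner_eq, bItems_eq]
  rcases h1 : dAux mp (candsOf (aGetOr d k1)) PySem.Set.empty [] with ⟨s1, o1, b1⟩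
  cases b1
  · simp only [h1]
    rcases h2 : dAux mp (candsOf (aGetOr d k2)) s1 o1 with ⟨s2, o2, b2⟩
    cases b2
    · simp only [h2]
      rcases h3 : dAux mp (candsOf (aGetOr d k3)) s2 o2 with ⟨s3, o3, b3⟩
      cases b3 <;> simp [h3]
    · simp [h2]
  · simp [h1]

-- ===== VERDICT (by name: the statement is the Claim_ definition above) =====
theorem summary_key_points_spec : Claim_equal_summary_key_points := by
  intro d mp _
  unfold Spec_summary_key_points summary_key_points summary_key_points_alt
  have hkey : (fun k => (aGet d k).isSome) = (fun k => (d.find? (fun p => p.1 == k)).isSome) := by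
    funext k; simp [aGet]
  rw [hkey]
  by_cases h : (["positive", "negative", "neutral"].any fun k => (d.find? (fun p => p.1 == k)).isSome) = true
  · rw [if_pos h, if_pos h]
    exact main_eq d mp _ _ _
  · rw [if_neg h, if_neg h]
    exact main_eq d mp _ _ _
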